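-- pv_equiv track=rewrite | github.com/lynolz163/autosecaudit | autosecaudit/agent_core/builtin_tools.py | _follow_up_hints_from_signals
-- ===== SOURCE A (Python) =====
-- def _follow_up_hints_from_signals(signals: list[str]) -> list[str]:
--     mapping = {
--         "login_interface": ("login_form_detector", "cookie_security_audit"),
--         "admin_surface": ("passive_config_audit", "nuclei_exploit_check"),
--         "debug_surface": ("error_page_analyzer", "passive_config_audit"),
--         "high_interaction_surface": ("active_web_crawler", "param_fuzzer"),
--     }
--     hints: list[str] = []
--     seen: set[str] = set()
--     for signal in signals:
--         for tool_name in mapping.get(signal, ()):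
--             if tool_name in seen:
--                 continue
--             seen.add(tool_name)
--             hints.append(tool_name)
--     return hints
-- ===== SOURCE B (Python) =====
-- def _follow_up_hints_from_signals(signals: list[str]) -> list[str]:
--     mapping = {
--         "login_interface": ("login_form_detector", "cookie_security_audit"),
--         "admin_surface": ("passive_config_audit", "nuclei_exploit_check"),
--         "debug_surface": ("error_page_analyzer", "passive_config_audit"),
--         "high_interaction_surface": ("active_web_crawler", "param_fuzzer"),
--     }
--     hints: list[str] = []
--     for sig in reversed(signals):
--         block = mapping.get(sig, ())
--         hints = list(block) + [t for t in hints if t not in block]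
--     return hints
-- ===== Notes on version B (the rewrite author's own statement) =====
-- stated objective: alternative
-- what changed: Replaces A's forward nested loop with seen-set bookkeeping by a right-to-left pass that builds the result back-to-front: each signal's mapped block is placed in front of the accumulated result while later duplicates are dropped by filtering against the block, so no seen-set is maintained.
import Mathlib
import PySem

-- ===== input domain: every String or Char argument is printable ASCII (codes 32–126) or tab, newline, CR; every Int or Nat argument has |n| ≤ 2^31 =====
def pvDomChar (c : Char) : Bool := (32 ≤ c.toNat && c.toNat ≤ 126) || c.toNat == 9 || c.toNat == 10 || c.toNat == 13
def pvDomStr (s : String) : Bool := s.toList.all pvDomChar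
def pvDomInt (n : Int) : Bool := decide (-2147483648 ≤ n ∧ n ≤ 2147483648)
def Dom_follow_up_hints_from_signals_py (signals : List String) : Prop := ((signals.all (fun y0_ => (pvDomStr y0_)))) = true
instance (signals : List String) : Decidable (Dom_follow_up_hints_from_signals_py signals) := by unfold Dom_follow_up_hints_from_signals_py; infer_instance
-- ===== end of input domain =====

-- B replaces A's forward loop with a seen-set by a right-to-left pass that merges each signal's block in front of the
-- accumulated result, filtering later duplicates by membership in the block (alternative decomposition, same results).


-- ===== PORT A =====
-- mapping.get(signal, ()) — the literal dict from the source, as a lookup helper (shared by both ports)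
def pvMapping (s : String) : List String :=
  if s = "login_interface" then ["login_form_detector", "cookie_security_audit"]
  else if s = "admin_surface" then ["passive_config_audit", "nuclei_exploit_check"]
  else if s = "debug_surface" then ["error_page_analyzer", "passive_config_audit"]
  else if s = "high_interaction_surface" then ["active_web_crawler", "param_fuzzer"]
  else []

-- A: one nested forward loop, appending to hints while maintaining a seen-set
def follow_up_hints_from_signals_py (signals : List String) : List String :=
  (signals.foldl
    (fun (st : List String × PySem.Set String) signal =>
      (pvMapping signal).foldl
        (fun st tool_name =>
          if st.2.contains tool_name then st
          else (st.1 ++ [tool_name], st.2.add tool_name)) st)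
    ([], PySem.Set.empty)).1

-- ===== PORT B =====
-- B: iterate over reversed(signals), merging each block in front and filtering later duplicates (= foldr)
def follow_up_hints_from_signals_py_alt (signals : List String) : List String :=
  signals.foldr
    (fun signal hints =>
      pvMapping signal ++ hints.filter (fun t => !(pvMapping signal).contains t))
    []

-- ===== PRECONDITION & SPEC =====
def Spec_follow_up_hints_from_signals_py (signals : List String) (out : List String) : Prop := out = follow_up_hints_from_signals_py_alt signals
instance (signals : List String) (out : List String) : Decidable (Spec_follow_up_hints_from_signals_py signals out) := by unfold Spec_follow_up_hints_from_signals_py; infer_instance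

-- ===== CLAIM (what is proved, stated in full; the proofs are below) =====
def Claim_equal_follow_up_hints_from_signals_py : Prop := ∀ (signals : List String), Dom_follow_up_hints_from_signals_py signals → Spec_follow_up_hints_from_signals_py signals (follow_up_hints_from_signals_py signals)

-- ===== LEMMAS AND PROOFS =====

-- A's inner step on a diagonal state (l, l) is Set.add on both components
theorem pvStep_diag (l : List String) (t : String) :
    (if (PySem.Set.contains l t) then ((l, l) : List String × PySem.Set String)
     else (l ++ [t], PySem.Set.add l t)) = (PySem.Set.add l t, PySem.Set.add l t) := by
  simp only [PySem.Set.add]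
  split <;> rfl

theorem pvInner_diag (xs : List String) (l : List String) :
    xs.foldl (fun (st : List String × PySem.Set String) t =>
        if st.2.contains t then st else (st.1 ++ [t], st.2.add t)) (l, l)
      = (xs.foldl PySem.Set.add l, xs.foldl PySem.Set.add l) := by
  induction xs generalizing l with
  | nil => rfl
  | cons x xs ih =>
    simp only [List.foldl_cons]
    rw [show (if (PySem.Set.contains l x) then ((l, l) : List String × PySem.Set String)
        else (l ++ [x], PySem.Set.add l x)) = (PySem.Set.add l x, PySem.Set.add l x) from
        pvStep_diag l x]
    exact ih _

theorem pvOuter_diag (signals : List String) (l : List String) :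
    signals.foldl (fun (st : List String × PySem.Set String) signal =>
        (pvMapping signal).foldl
          (fun st t => if st.2.contains t then st else (st.1 ++ [t], st.2.add t)) st) (l, l)
      = ((signals.flatMap pvMapping).foldl PySem.Set.add l,
         (signals.flatMap pvMapping).foldl PySem.Set.add l) := by
  induction signals generalizing l with
  | nil => rfl
  | cons s ss ih =>
    simp only [List.foldl_cons, List.flatMap_cons, List.foldl_append]
    rw [pvInner_diag]
    exact ih _

-- folding Set.add over b from any start s appends b's fresh first occurrences, filtered against s
theorem pvFoldl_add_eq (b : List String) (s : List String) :
    b.foldl PySem.Set.add s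
      = s ++ (b.foldl PySem.Set.add []).filter (fun t => !s.contains t) := by
  induction b generalizing s with
  | nil => simp
  | cons x b ih =>
    simp only [List.foldl_cons]
    rw [ih (PySem.Set.add s x), ih (PySem.Set.add [] x)]
    simp only [PySem.Set.add, PySem.Set.contains]
    by_cases hx : x ∈ s
    · simp [hx, List.filter_filter]
      apply List.filter_congr
      intro t _
      by_cases ht : t ∈ s
      · simp [ht]
      · have : t ≠ x := fun h => ht (h ▸ hx)
        simp [ht, this]
    · simp [hx, List.filter_filter]

-- each mapping block is duplicate-free, so folding Set.add over it from [] is the identity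
theorem pvOfList_pvMapping (s : String) :
    (pvMapping s).foldl PySem.Set.add [] = pvMapping s := by
  unfold pvMapping
  split_ifs <;> decide

-- B computes Set.ofList of the flattened mapped names
theorem pvAlt_eq_ofList (signals : List String) :
    follow_up_hints_from_signals_py_alt signals
      = (signals.flatMap pvMapping).foldl PySem.Set.add [] := by
  induction signals with
  | nil => rfl
  | cons s ss ih =>
    simp only [follow_up_hints_from_signals_py_alt, List.foldr_cons, List.flatMap_cons,
      List.foldl_append]
    rw [pvFoldl_add_eq _ ((pvMapping s).foldl PySem.Set.add []), pvOfList_pvMapping]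
    congr 1
    rw [← ih]
    rfl

-- ===== VERDICT (by name: the statement is the Claim_ definition above) =====
theorem follow_up_hints_from_signals_py_spec : Claim_equal_follow_up_hints_from_signals_py := by
  intro signals _
  show follow_up_hints_from_signals_py signals = follow_up_hints_from_signals_py_alt signals
  unfold follow_up_hints_from_signals_py
  rw [show (PySem.Set.empty : PySem.Set String) = ([] : List String) from rfl, pvOuter_diag,
    pvAlt_eq_ofList]
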